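-- pv_equiv track=rewrite | github.com/elfeasto/Algorithms | week5_dynamic_programming1/Own Work/DPAlignment.py | words_aligned
-- ===== SOURCE A (Python) =====
-- INSERTION = 0
--
-- MATCH = 2
--
-- def words_aligned(word1, word2, instructions):
--     idx1 = 0
--     idx2 = 0
--     matched_words = ["", ""]
--     for instruction in instructions:
--         if instruction == MATCH:
--             matched_words[0] += word1[idx1]
--             idx1 += 1
--             matched_words[1] += word2[idx2]
--             idx2 += 1
--         elif instruction == INSERTION:
--             matched_words[0] += "-"
--             # idx1 stays the same
--             matched_words[1] += word2[idx2]
--             idx2 += 1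
--         else:
--             matched_words[0] += word1[idx1]
--             idx1 += 1
--             matched_words[1] += "-"
--
--     return matched_words
-- ===== SOURCE B (Python) =====
-- INSERTION = 0
--
-- MATCH = 2
--
-- def _scatter_row(word, instructions, consumes):
--     # start from an all-dash row, then overwrite the consuming slots with the word's chars
--     row = ["-"] * len(instructions)
--     positions = [i for i, ins in enumerate(instructions) if consumes(ins)]
--     for p, c in zip(positions, word):
--         row[p] = c
--     return "".join(row)
--
-- def words_aligned(word1, word2, instructions):
--     return [_scatter_row(word1, instructions, lambda ins: ins != INSERTION),
--             _scatter_row(word2, instructions, lambda ins: ins == INSERTION or ins == MATCH)]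
-- ===== Notes on version B (the rewrite author's own statement) =====
-- stated objective: faster
-- what changed: Instead of A's single interleaved loop keeping two running indices and appending to both rows by repeated string concatenation, B preallocates each row as an all-dash list, computes once the list of slot positions that consume a word (enumerate+filter), scatters the word's characters into those slots by direct assignment, and joins.
import Mathlib
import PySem

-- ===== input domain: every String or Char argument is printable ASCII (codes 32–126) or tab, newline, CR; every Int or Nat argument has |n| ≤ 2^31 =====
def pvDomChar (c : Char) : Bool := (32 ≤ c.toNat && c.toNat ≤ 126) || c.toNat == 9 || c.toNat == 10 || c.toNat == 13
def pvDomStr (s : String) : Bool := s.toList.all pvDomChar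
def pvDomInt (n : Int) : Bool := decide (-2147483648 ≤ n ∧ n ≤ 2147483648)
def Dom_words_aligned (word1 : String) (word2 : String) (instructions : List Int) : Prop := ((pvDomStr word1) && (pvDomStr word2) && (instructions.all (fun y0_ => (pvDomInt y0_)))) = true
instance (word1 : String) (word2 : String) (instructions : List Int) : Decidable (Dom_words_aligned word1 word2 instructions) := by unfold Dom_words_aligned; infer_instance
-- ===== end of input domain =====

-- B preallocates each output row as all dashes and scatters the word's characters into the
-- consuming slot positions (computed once by enumerate+filter), instead of A's single
-- interleaved loop with two running indices building both rows by repeated concatenation.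

-- ===== PORT A =====
-- A's loop over instructions with state (idx1, idx2, matched_words[0], matched_words[1]);
-- word[idx] is cs[idx]? (idx is a nonnegative running index, so this matches Python indexing);
-- `none` marks Python's IndexError.
def goA : List Char → List Char → Nat → Nat → List Char → List Char → List Int →
    Option (List Char × List Char)
  | _,   _,   _,    _,    acc0, acc1, [] => some (acc0, acc1)
  | cs1, cs2, idx1, idx2, acc0, acc1, i :: rest =>
    if i = 2 then
      match cs1[idx1]?, cs2[idx2]? with
      | some c1, some c2 =>
          goA cs1 cs2 (idx1 + 1) (idx2 + 1) (acc0 ++ [c1]) (acc1 ++ [c2]) rest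
      | _, _ => none
    else if i = 0 then
      match cs2[idx2]? with
      | some c2 => goA cs1 cs2 idx1 (idx2 + 1) (acc0 ++ ['-']) (acc1 ++ [c2]) rest
      | none => none
    else
      match cs1[idx1]? with
      | some c1 => goA cs1 cs2 (idx1 + 1) idx2 (acc0 ++ [c1]) (acc1 ++ ['-']) rest
      | none => none

def words_aligned (word1 : String) (word2 : String) (instructions : List Int) : List String :=
  match goA word1.toList word2.toList 0 0 [] [] instructions with
  | some (m0, m1) => [String.ofList m0, String.ofList m1]
  | none => []    -- unreachable under Pre_ (Python raises IndexError here)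

-- ===== PORT B =====
-- Source B's _scatter_row: all-dash row, the consuming positions via enumerate+filter, then
-- scatter word characters into those slots (zip truncates like Python's zip).
-- The positions from enumerate are nonnegative and in range, so `.toNat` is exact here.
def scatterRow (word : List Char) (instructions : List Int) (consumes : Int → Bool) : List Char :=
  let row := List.replicate instructions.length '-'
  let positions := (PySem.List.enumerate instructions).filterMap
    (fun ix => if consumes ix.2 then some ix.1 else none)
  (positions.zip word).foldl (fun r pc => r.set pc.1.toNat pc.2) row

def words_aligned_alt (word1 : String) (word2 : String) (instructions : List Int) : List String :=
  [String.ofList (scatterRow word1.toList instructions (fun ins => !(ins == 0))),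
   String.ofList (scatterRow word2.toList instructions (fun ins => ins == 0 || ins == 2))]

-- ===== PRECONDITION & SPEC =====
-- Pre_ excludes exactly the inputs where Python A raises IndexError: instruction lists that
-- consume more characters than word1 (instructions ≠ 0) or word2 (instructions 0 or 2) provide.
def Pre_words_aligned (word1 : String) (word2 : String) (instructions : List Int) : Prop :=
  instructions.countP (fun i => !(i == 0)) ≤ word1.length ∧
  instructions.countP (fun i => i == 0 || i == 2) ≤ word2.length
instance (word1 : String) (word2 : String) (instructions : List Int) : Decidable (Pre_words_aligned word1 word2 instructions) := by unfold Pre_words_aligned; infer_instance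

def pvWitness_words_aligned : String × String × List Int := ("ab", "cd", [2, 0, 1])

def Spec_words_aligned (word1 : String) (word2 : String) (instructions : List Int) (out : List String) : Prop := out = words_aligned_alt word1 word2 instructions
instance (word1 : String) (word2 : String) (instructions : List Int) (out : List String) : Decidable (Spec_words_aligned word1 word2 instructions out) := by unfold Spec_words_aligned; infer_instance

-- ===== CLAIM (what is proved, stated in full; the proofs are below) =====
def Claim_equal_words_aligned : Prop := ∀ (word1 : String) (word2 : String) (instructions : List Int), Dom_words_aligned word1 word2 instructions → Pre_words_aligned word1 word2 instructions → Spec_words_aligned word1 word2 instructions (words_aligned word1 word2 instructions)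

-- ===== LEMMAS AND PROOFS =====

-- Proof-side functional description of one row: consume a char when `consume i`, else emit '-';
-- `none` = word exhausted.
def rowPass (consume : Int → Bool) : List Char → List Int → Option (List Char)
  | _,  [] => some []
  | cs, i :: rest =>
    if consume i then
      match cs with
      | c :: cs' => (rowPass consume cs' rest).map (fun r => c :: r)
      | [] => none
    else (rowPass consume cs rest).map (fun r => '-' :: r)

-- A's interleaved loop from indices (idx1, idx2) equals the pair of independent row passes over
-- the remaining suffixes of the two words, prepended with the accumulators.
lemma goA_eq_rows (ins : List Int) : ∀ (cs1 cs2 : List Char) (idx1 idx2 : Nat)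
    (acc0 acc1 : List Char),
    goA cs1 cs2 idx1 idx2 acc0 acc1 ins =
      match rowPass (fun i => !(i == 0)) (cs1.drop idx1) ins,
            rowPass (fun i => i == 0 || i == 2) (cs2.drop idx2) ins with
      | some r0, some r1 => some (acc0 ++ r0, acc1 ++ r1)
      | _, _ => none := by
  induction ins with
  | nil => intro cs1 cs2 idx1 idx2 acc0 acc1; simp [goA, rowPass]
  | cons i rest ih =>
    intro cs1 cs2 idx1 idx2 acc0 acc1
    have h1 : cs1[idx1]? = (cs1.drop idx1).head? := by simp [List.head?_drop]
    have h2 : cs2[idx2]? = (cs2.drop idx2).head? := by simp [List.head?_drop]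
    have t1 : cs1.drop (idx1 + 1) = (cs1.drop idx1).tail := by simp [List.tail_drop]
    have t2 : cs2.drop (idx2 + 1) = (cs2.drop idx2).tail := by simp [List.tail_drop]
    by_cases hi2 : i = 2
    · subst hi2
      rcases hd1 : cs1.drop idx1 with _ | ⟨c1, cs1'⟩ <;>
        rcases hd2 : cs2.drop idx2 with _ | ⟨c2, cs2'⟩
      · simp_all [goA, rowPass]
      · simp_all [goA, rowPass]
      · simp_all [goA, rowPass]
      · simp_all [goA, rowPass]
        rcases rowPass (fun i => !(i == 0)) cs1' rest with _ | r0 <;>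
          rcases rowPass (fun i => i == 0 || i == 2) cs2' rest with _ | r1 <;> simp
    · by_cases hi0 : i = 0
      · subst hi0
        rcases hd2 : cs2.drop idx2 with _ | ⟨c2, cs2'⟩
        · simp_all [goA, rowPass]
        · simp_all [goA, rowPass]
          rcases rowPass (fun i => !(i == 0)) (cs1.drop idx1) rest with _ | r0 <;>
            rcases rowPass (fun i => i == 0 || i == 2) cs2' rest with _ | r1 <;> simp
      · rcases hd1 : cs1.drop idx1 with _ | ⟨c1, cs1'⟩
        · simp_all [goA, rowPass]
        · simp_all [goA, rowPass]
          rcases rowPass (fun i => !(i == 0)) cs1' rest with _ | r0 <;>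
            rcases rowPass (fun i => i == 0 || i == 2) (cs2.drop idx2) rest with _ | r1 <;> simp

-- the position list of B, extracted
def posList (consumes : Int → Bool) (instructions : List Int) : List Int :=
  (PySem.List.enumerate instructions).filterMap
    (fun ix => if consumes ix.2 then some ix.1 else none)

lemma enumerate_shift {α : Type} (xs : List α) : ∀ (s : Int),
    PySem.List.enumerate xs s = (PySem.List.enumerate xs 0).map (fun q => (q.1 + s, q.2)) := by
  induction xs with
  | nil => intro s; simp [PySem.List.enumerate_nil]
  | cons x xs ih =>
    intro s
    rw [PySem.List.enumerate_cons, PySem.List.enumerate_cons]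
    simp only [zero_add]
    rw [ih (s + 1), ih 1]
    simp only [List.map_cons, List.map_map, Function.comp_def, zero_add]
    refine List.cons_eq_cons.mpr ⟨rfl, ?_⟩
    apply List.map_congr_left; intro q _
    simp only [Prod.mk.injEq, and_true]
    ring

lemma posList_cons (p : Int → Bool) (i : Int) (rest : List Int) :
    posList p (i :: rest) =
      (if p i then [(0 : Int)] else []) ++ (posList p rest).map (fun k => k + 1) := by
  unfold posList
  rw [PySem.List.enumerate_cons]
  simp only [zero_add]
  rw [enumerate_shift rest 1]
  simp only [List.filterMap_cons, List.filterMap_map, List.map_filterMap]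
  by_cases hp : p i <;> simp [hp]

lemma posList_nonneg (p : Int → Bool) (ins : List Int) :
    ∀ x ∈ posList p ins, 0 ≤ x := by
  induction ins with
  | nil => simp [posList, PySem.List.enumerate_nil]
  | cons i rest ih =>
    intro x hx
    rw [posList_cons] at hx
    rcases List.mem_append.1 hx with h | h
    · split at h <;> simp_all
    · obtain ⟨y, hy, rfl⟩ := List.mem_map.1 h
      have := ih y hy; omega

lemma scatter_shift (ps : List Int) : ∀ (cs row : List Char) (c0 : Char),
    (∀ x ∈ ps, 0 ≤ x) →
    ((ps.map (fun k => k + 1)).zip cs).foldl (fun r pc => r.set pc.1.toNat pc.2) (c0 :: row)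
      = c0 :: (ps.zip cs).foldl (fun r pc => r.set pc.1.toNat pc.2) row := by
  induction ps with
  | nil => intro cs row c0 _; simp
  | cons p ps ih =>
    intro cs row c0 hnn
    rcases cs with _ | ⟨c, cs'⟩
    · simp
    · have hp : 0 ≤ p := hnn p (by simp)
      have ht : (p + 1).toNat = p.toNat + 1 := by omega
      simp only [List.map_cons, List.zip_cons_cons, List.foldl_cons, ht, List.set]
      exact ih cs' (row.set p.toNat c) c0 (fun x hx => hnn x (by simp [hx]))

lemma scatterRow_eq (cs : List Char) (ins : List Int) (p : Int → Bool) :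
    scatterRow cs ins p =
      ((posList p ins).zip cs).foldl (fun r pc => r.set pc.1.toNat pc.2)
        (List.replicate ins.length '-') := by
  simp [scatterRow, posList]

-- B's scatter reproduces the functional row pass wherever the latter returns.
lemma scatter_of_rowPass (p : Int → Bool) : ∀ (ins : List Int) (cs : List Char) (r : List Char),
    rowPass p cs ins = some r → scatterRow cs ins p = r := by
  intro ins
  induction ins with
  | nil =>
    intro cs r h
    simp [rowPass] at h
    simp [scatterRow, PySem.List.enumerate_nil, ← h]
  | cons i rest ih =>
    intro cs r h
    by_cases hp : p i
    · rcases cs with _ | ⟨c, cs'⟩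
      · simp [rowPass, hp] at h
      · simp only [rowPass, hp, if_pos] at h
        rcases hr : rowPass p cs' rest with _ | r' <;> rw [hr] at h
        · simp at h
        · simp at h
          rw [scatterRow_eq, posList_cons, if_pos hp]
          simp only [List.singleton_append, List.length_cons, List.replicate_succ,
            List.zip_cons_cons, List.foldl_cons, Int.toNat_zero, List.set]
          rw [scatter_shift _ cs' _ c (posList_nonneg p rest), ← scatterRow_eq,
            ih cs' r' hr]
          exact h
    · simp only [rowPass, hp, if_neg, Bool.false_eq_true, not_false_iff] at h
      rcases hr : rowPass p cs rest with _ | r' <;> rw [hr] at h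
      · simp at h
      · simp at h
        rw [scatterRow_eq, posList_cons, if_neg (by simp [hp]), List.nil_append]
        simp only [List.length_cons, List.replicate_succ]
        rw [scatter_shift _ cs _ '-' (posList_nonneg p rest), ← scatterRow_eq,
          ih cs r' hr]
        exact h

-- totality of the row pass under the counting precondition
lemma rowPass_isSome (p : Int → Bool) : ∀ (ins : List Int) (cs : List Char),
    ins.countP p ≤ cs.length → ∃ r, rowPass p cs ins = some r := by
  intro ins
  induction ins with
  | nil => intro cs _; exact ⟨[], rfl⟩
  | cons i rest ih =>
    intro cs hc
    rw [List.countP_cons] at hc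
    by_cases hp : p i
    · rcases cs with _ | ⟨c, cs'⟩
      · simp [hp] at hc
      · simp [hp] at hc
        obtain ⟨r', hr⟩ := ih cs' (by simpa using hc)
        exact ⟨c :: r', by simp [rowPass, hp, hr]⟩
    · obtain ⟨r', hr⟩ := ih cs (by simp [hp] at hc; omega)
      exact ⟨'-' :: r', by simp [rowPass, hp, hr]⟩

-- ===== VERDICT (by name: the statement is the Claim_ definition above) =====
theorem words_aligned_spec : Claim_equal_words_aligned := by
  intro word1 word2 instructions _ hpre
  obtain ⟨h1, h2⟩ := hpre
  obtain ⟨r0, hr0⟩ := rowPass_isSome (fun i => !(i == 0)) instructions word1.toList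
    (by simpa using h1)
  obtain ⟨r1, hr1⟩ := rowPass_isSome (fun i => i == 0 || i == 2) instructions word2.toList
    (by simpa using h2)
  unfold Spec_words_aligned words_aligned words_aligned_alt
  rw [goA_eq_rows]
  simp only [List.drop_zero]
  rw [hr0, hr1, scatter_of_rowPass _ _ _ _ hr0, scatter_of_rowPass _ _ _ _ hr1]
  simp
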